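-- pv_equiv track=rewrite | github.com/pnnv/hyprland-dotfiles | VSCodium/User/History/-77d32fd6/SMI3.py | max_subsegments_with_T_as_subsequence
-- ===== SOURCE A (Python) =====
-- def max_subsegments_with_T_as_subsequence(S, T, K):
--     N = len(S)
--     M = len(T)
--
--     # Function to check if T can be a subsequence of subsegment S[start:end+1] with at most K changes
--     def can_make_subsequence_with_changes(start, end, K):
--         # Create a DP table where dp[j] is the minimum number of changes needed to form T[:j] from S[start:end+1]
--         dp = [float('inf')] * (M + 1)
--         dp[0] = 0
--
--         for i in range(start, end + 1):
--             # Traverse T in reverse to prevent overwriting results for the current S[i]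
--             for j in range(M - 1, -1, -1):
--                 if S[i] == T[j]:
--                     dp[j + 1] = min(dp[j + 1], dp[j])
--                 else:
--                     dp[j + 1] = min(dp[j + 1], dp[j] + 1)
--
--         return dp[M] <= K
--
--     count = 0
--
--     # Check all subsegments of S
--     for start in range(N):
--         for end in range(start + M - 1, N):
--             if can_make_subsequence_with_changes(start, end, K):
--                 count += 1
--
--     return count
-- ===== SOURCE B (Python) =====
-- def max_subsegments_with_T_as_subsequence(S, T, K):
--     N = len(S)
--     M = len(T)
--     INF = float('inf')
--     count = 0
--     # One DP row per start, extended end by end; starts past N - M admit no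
--     # segment of length >= M, so they are not visited at all.
--     for start in range(N - M + 1):
--         dp = [INF] * (M + 1)
--         dp[0] = 0
--         for end in range(start, N):
--             c = S[end]
--             for j in range(M - 1, -1, -1):
--                 cand = dp[j] if c == T[j] else dp[j] + 1
--                 if cand < dp[j + 1]:
--                     dp[j + 1] = cand
--             if end - start + 1 >= M and dp[M] <= K:
--                 count += 1
--     return count
-- ===== Notes on version B (the rewrite author's own statement) =====
-- stated objective: faster
-- what changed: B keeps one DP row per start and extends the segment end incrementally (updating the row with each new character) instead of recomputing the whole DP from scratch for every (start, end) pair, and never visits starts that admit no segment of length >= len(T).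
-- outside the precondition, e.g. on max_subsegments_with_T_as_subsequence('ab', '', 0): A returns 5, B returns 3
import Mathlib
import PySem

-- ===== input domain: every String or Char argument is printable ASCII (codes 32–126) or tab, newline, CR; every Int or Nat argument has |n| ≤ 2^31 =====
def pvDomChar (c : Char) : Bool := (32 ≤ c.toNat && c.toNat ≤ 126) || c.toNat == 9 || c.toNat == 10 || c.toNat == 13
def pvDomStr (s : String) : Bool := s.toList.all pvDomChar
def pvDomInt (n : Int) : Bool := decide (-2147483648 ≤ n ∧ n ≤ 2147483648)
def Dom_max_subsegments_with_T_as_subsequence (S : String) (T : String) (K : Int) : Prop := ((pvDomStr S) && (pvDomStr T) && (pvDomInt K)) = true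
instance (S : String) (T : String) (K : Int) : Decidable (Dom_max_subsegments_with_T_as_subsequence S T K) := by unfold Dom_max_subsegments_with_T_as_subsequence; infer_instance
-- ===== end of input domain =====

-- B keeps one DP row per start and extends the segment end incrementally instead of
-- recomputing the row from scratch for every (start, end) pair, and never visits starts
-- past N - len(T) (they admit no segment of length >= len(T)).

-- Shared model of Python's float('inf') DP cells: none = inf.
def pvMinO : Option Int → Option Int → Option Int
  | none, b => b
  | some x, none => some x
  | some x, some y => some (min x y)

def pvAddO (a : Option Int) (n : Int) : Option Int := a.map (· + n)

def pvLeK (a : Option Int) (k : Int) : Bool :=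
  match a with
  | none => false
  | some x => decide (x ≤ k)

def pvLtO (a b : Option Int) : Bool :=
  match a, b with
  | none, _ => false
  | some _, none => true
  | some x, some y => decide (x < y)

def pvDP0 (M : Nat) : List (Option Int) := some 0 :: List.replicate M none

-- ===== PORT A =====
-- the inner 'for j in range(M-1,-1,-1)' pass (in-place; each write goes to j+1, reads are at j and j+1)
def pvStepA (Tl : List Char) (c : Char) (dp : List (Option Int)) : List (Option Int) :=
  (List.range Tl.length).reverse.foldl (fun dp j =>
    dp.set (j+1) (if c == Tl.getD j ' '
      then pvMinO (dp.getD (j+1) none) (dp.getD j none)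
      else pvMinO (dp.getD (j+1) none) (pvAddO (dp.getD j none) 1))) dp

def pvCanMake (Sl Tl : List Char) (start endI : Nat) (K : Int) : Bool :=
  pvLeK (((List.range' start (endI + 1 - start)).foldl
      (fun dp i => pvStepA Tl (Sl.getD i ' ') dp) (pvDP0 Tl.length)).getD Tl.length none) K

-- Nat subtraction in 'start + M - 1' matches Python's range(start+M-1, N) only for M ≥ 1; M = 0 is outside Pre_.
def max_subsegments_with_T_as_subsequence (S : String) (T : String) (K : Int) : Int :=
  (List.range S.toList.length).foldl (fun count start =>
    (List.range' (start + T.toList.length - 1)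
        (S.toList.length - (start + T.toList.length - 1))).foldl (fun count endI =>
      if pvCanMake S.toList T.toList start endI K then count + 1 else count) count) 0

-- ===== PORT B =====
-- B's inner pass: conditional in-place improvement 'if cand < dp[j+1]: dp[j+1] = cand'
def pvStepB (Tl : List Char) (c : Char) (dp : List (Option Int)) : List (Option Int) :=
  (List.range Tl.length).reverse.foldl (fun dp j =>
    let cand := if c == Tl.getD j ' ' then dp.getD j none else pvAddO (dp.getD j none) 1
    if pvLtO cand (dp.getD (j+1) none) then dp.set (j+1) cand else dp) dp

def max_subsegments_with_T_as_subsequence_alt (S : String) (T : String) (K : Int) : Int :=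
  (List.range (S.toList.length - T.toList.length + 1)).foldl (fun count start =>
    ((List.range' start (S.toList.length - start)).foldl
      (fun (st : Int × List (Option Int)) endI =>
        let dp := pvStepB T.toList (S.toList.getD endI ' ') st.2
        (if decide (start + T.toList.length ≤ endI + 1) && pvLeK (dp.getD T.toList.length none) K
         then st.1 + 1 else st.1, dp))
      (count, pvDP0 T.toList.length)).1) 0

-- ===== PRECONDITION & SPEC =====
-- Pre_ excludes the empty pattern T = "": there A's range(start-1, N) also counts an empty
-- subsegment per start, an accidental corner where B's count (segments of length ≥ 0 starting at start) is as defensible.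
def Pre_max_subsegments_with_T_as_subsequence (S : String) (T : String) (K : Int) : Prop := T ≠ ""
instance (S : String) (T : String) (K : Int) : Decidable (Pre_max_subsegments_with_T_as_subsequence S T K) := by unfold Pre_max_subsegments_with_T_as_subsequence; infer_instance

def pvWitness_max_subsegments_with_T_as_subsequence : String × String × Int := ("ab", "a", 1)

def Spec_max_subsegments_with_T_as_subsequence (S : String) (T : String) (K : Int) (out : Int) : Prop := out = max_subsegments_with_T_as_subsequence_alt S T K
instance (S : String) (T : String) (K : Int) (out : Int) : Decidable (Spec_max_subsegments_with_T_as_subsequence S T K out) := by unfold Spec_max_subsegments_with_T_as_subsequence; infer_instance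

-- ===== CLAIM (what is proved, stated in full; the proofs are below) =====
def Claim_equal_max_subsegments_with_T_as_subsequence : Prop := ∀ (S : String) (T : String) (K : Int), Dom_max_subsegments_with_T_as_subsequence S T K → Pre_max_subsegments_with_T_as_subsequence S T K → Spec_max_subsegments_with_T_as_subsequence S T K (max_subsegments_with_T_as_subsequence S T K)

-- ===== LEMMAS AND PROOFS =====

theorem pvMinO_eq_ite (a b : Option Int) : pvMinO b a = if pvLtO a b then a else b := by
  cases a <;> cases b <;> simp [pvMinO, pvLtO, min_def] <;> split_ifs <;> first | rfl | omega

theorem set_ite_eq_set_min (dp : List (Option Int)) (i : Nat) (a : Option Int) :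
    (if pvLtO a (dp.getD i none) then dp.set i a else dp)
      = dp.set i (pvMinO (dp.getD i none) a) := by
  rw [pvMinO_eq_ite]
  split
  · rfl
  · by_cases hi : i < dp.length
    · have : dp.getD i none = dp[i] := by simp [List.getD, List.getElem?_eq_getElem hi]
      rw [this, List.set_getElem_self hi]
    · rw [List.set_eq_of_length_le (by omega)]

theorem stepB_eq_stepA (Tl : List Char) (c : Char) (dp : List (Option Int)) :
    pvStepB Tl c dp = pvStepA Tl c dp := by
  unfold pvStepB pvStepA
  refine PySem.List.foldl_congr_mem _ _ _ _ (fun dp j _ => ?_)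
  simp only []
  split <;> rw [set_ite_eq_set_min]

-- proof-side abbreviations
def pvG (Sl Tl : List Char) (dp : List (Option Int)) (i : Nat) : List (Option Int) :=
  pvStepA Tl (Sl.getD i ' ') dp

def pvD (Sl Tl : List Char) (start s : Nat) : List (Option Int) :=
  (List.range' start (s - start)).foldl (pvG Sl Tl) (pvDP0 Tl.length)

theorem pvD_succ (Sl Tl : List Char) (start s : Nat) (h : start ≤ s) :
    pvD Sl Tl start (s+1) = pvG Sl Tl (pvD Sl Tl start s) s := by
  unfold pvD
  have h1 : s + 1 - start = (s - start) + 1 := by omega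
  rw [h1, List.range'_1_concat, List.foldl_append, Nat.add_sub_cancel' h]
  rfl

theorem canMake_eq (Sl Tl : List Char) (start e : Nat) (K : Int) :
    pvCanMake Sl Tl start e K = pvLeK ((pvD Sl Tl start (e+1)).getD Tl.length none) K := rfl

theorem inner_eq (Sl Tl : List Char) (K : Int) (start : Nat) (k : Nat) :
    ∀ (s : Nat) (c : Int), start ≤ s →
    ((List.range' s k).foldl
      (fun (st : Int × List (Option Int)) endI =>
        let dp := pvStepB Tl (Sl.getD endI ' ') st.2
        (if decide (start + Tl.length ≤ endI + 1) && pvLeK (dp.getD Tl.length none) K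
         then st.1 + 1 else st.1, dp))
      (c, pvD Sl Tl start s)).1
    = (List.range' s k).foldl (fun c e =>
        if decide (start + Tl.length ≤ e + 1) && pvCanMake Sl Tl start e K then c + 1 else c) c := by
  induction k with
  | zero => intro s c _; simp
  | succ k ih =>
    intro s c h
    rw [List.range'_succ, List.foldl_cons, List.foldl_cons]
    have hdp : pvStepB Tl (Sl.getD s ' ') (pvD Sl Tl start s) = pvD Sl Tl start (s+1) := by
      rw [stepB_eq_stepA, pvD_succ Sl Tl start s h]; rfl
    simp only [hdp, canMake_eq]
    exact ih (s+1) _ (by omega)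

theorem foldl_guard_false {f : Int → Nat → Int} {l : List Nat} {c : Int}
    (h : ∀ c e, e ∈ l → f c e = c) : l.foldl f c = c := by
  induction l generalizing c with
  | nil => rfl
  | cons a l ih =>
    rw [List.foldl_cons, h c a (List.mem_cons_self)]
    exact ih (fun c e he => h c e (List.mem_cons_of_mem _ he))

theorem per_start (Sl Tl : List Char) (hM : 1 ≤ Tl.length) (K : Int) (start : Nat) (c : Int) :
    ((List.range' start (Sl.length - start)).foldl
      (fun (st : Int × List (Option Int)) endI =>
        let dp := pvStepB Tl (Sl.getD endI ' ') st.2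
        (if decide (start + Tl.length ≤ endI + 1) && pvLeK (dp.getD Tl.length none) K
         then st.1 + 1 else st.1, dp))
      (c, pvDP0 Tl.length)).1
    = (List.range' (start + Tl.length - 1) (Sl.length - (start + Tl.length - 1))).foldl
        (fun count endI => if pvCanMake Sl Tl start endI K then count + 1 else count) c := by
  have h0 : pvDP0 Tl.length = pvD Sl Tl start start := by
    unfold pvD; simp
  rw [h0, inner_eq Sl Tl K start _ start c (Nat.le_refl _)]
  by_cases hN : Sl.length ≤ start + Tl.length - 1
  · have h1 : Sl.length - (start + Tl.length - 1) = 0 := by omega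
    rw [h1, List.range'_zero, List.foldl_nil]
    refine foldl_guard_false (fun c e he => ?_)
    have := (List.mem_range'_1).1 he
    have : ¬ (start + Tl.length ≤ e + 1) := by omega
    simp [this]
  · have hsplit : Sl.length - start = (Tl.length - 1) + (Sl.length - (start + Tl.length - 1)) := by omega
    rw [hsplit, ← List.range'_append_1, List.foldl_append]
    have hfirst : (List.range' start (Tl.length - 1)).foldl (fun c e =>
        if decide (start + Tl.length ≤ e + 1) && pvCanMake Sl Tl start e K then c + 1 else c) c = c := by
      refine foldl_guard_false (fun c e he => ?_)
      have := (List.mem_range'_1).1 he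
      have : ¬ (start + Tl.length ≤ e + 1) := by omega
      simp [this]
    rw [hfirst]
    have harg : start + (Tl.length - 1) = start + Tl.length - 1 := by omega
    rw [harg]
    refine PySem.List.foldl_congr_mem _ _ _ _ (fun c e he => ?_)
    have := (List.mem_range'_1).1 he
    have hg : start + Tl.length ≤ e + 1 := by omega
    simp [hg]

theorem range_pad (F : Int → Nat → Int) (Kc N : Nat) (hK : Kc ≤ N)
    (hid : ∀ (c : Int) (s : Nat), Kc ≤ s → F c s = c) (c : Int) :
    (List.range Kc).foldl F c = (List.range N).foldl F c := by
  rw [show N = Kc + (N - Kc) from by omega, List.range_add, List.foldl_append, List.foldl_map]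
  exact (foldl_guard_false (fun c e _ => hid c (Kc + e) (Nat.le_add_right _ _))).symm

theorem outer_pad (Sl Tl : List Char) (K : Int) (hM : 1 ≤ Tl.length) :
    (List.range (Sl.length - Tl.length + 1)).foldl (fun count start =>
      (List.range' (start + Tl.length - 1) (Sl.length - (start + Tl.length - 1))).foldl
        (fun count endI => if pvCanMake Sl Tl start endI K then count + 1 else count) count) (0 : Int)
    = (List.range Sl.length).foldl (fun count start =>
      (List.range' (start + Tl.length - 1) (Sl.length - (start + Tl.length - 1))).foldl
        (fun count endI => if pvCanMake Sl Tl start endI K then count + 1 else count) count) (0 : Int) := by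
  have hF : ∀ (c : Int) (s : Nat), Sl.length - Tl.length + 1 ≤ s →
      (List.range' (s + Tl.length - 1) (Sl.length - (s + Tl.length - 1))).foldl
        (fun count endI => if pvCanMake Sl Tl s endI K then count + 1 else count) c = c := by
    intro c s hs
    have h0 : Sl.length - (s + Tl.length - 1) = 0 := by omega
    rw [h0, List.range'_zero, List.foldl_nil]
  rcases Nat.eq_zero_or_pos Sl.length with hN | hN
  · have hK : Sl.length - Tl.length + 1 = 1 := by omega
    rw [hK]
    have h00 : (List.range' (0 + Tl.length - 1) ((0:Nat) - (0 + Tl.length - 1))).foldl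
        (fun count endI => if pvCanMake Sl Tl 0 endI K then count + 1 else count) (0 : Int) = 0 := by
      rw [show (0:Nat) - (0 + Tl.length - 1) = 0 from by omega, List.range'_zero, List.foldl_nil]
    simp only [List.range_one, List.foldl_cons, List.foldl_nil, hN, List.range_zero]
    exact h00
  · have hK : Sl.length - Tl.length + 1 ≤ Sl.length := by omega
    exact range_pad _ _ _ hK hF 0

theorem toList_ne_nil_of_ne_empty (T : String) (h : T ≠ "") : T.toList ≠ [] := by
  intro hnil
  apply h
  have := congrArg String.ofList hnil
  simpa using this

-- ===== VERDICT (by name: the statement is the Claim_ definition above) =====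
theorem max_subsegments_with_T_as_subsequence_spec : Claim_equal_max_subsegments_with_T_as_subsequence := by
  unfold Claim_equal_max_subsegments_with_T_as_subsequence
  intro S T K _ hPre
  unfold Spec_max_subsegments_with_T_as_subsequence
  have hM : 1 ≤ T.toList.length := by
    have := toList_ne_nil_of_ne_empty T hPre
    cases h : T.toList with
    | nil => exact absurd h this
    | cons a l => simp
  unfold max_subsegments_with_T_as_subsequence max_subsegments_with_T_as_subsequence_alt
  rw [← outer_pad S.toList T.toList K hM]
  exact PySem.List.foldl_congr_mem _ _ _ _ (fun c start _ =>
    (per_start S.toList T.toList hM K start c).symm)
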